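-- pv_equiv track=rewrite | github.com/Piombacciaio/Rimborsi-Scherma | data/cf.py | calculate_surname_chars
-- ===== SOURCE A (Python) =====
-- VOWELS = "AEIOU"
--
-- CONSONANTS = "BCDFGHJKLMNPQRSTVWXYZ"
--
-- def calculate_surname_chars(name:str):
--   if len(name) <= 3:
--     code = ""
--
--     for character in name:
--       if character in CONSONANTS:
--         code += character
--
--     for character in name:
--       if character in VOWELS:
--         code += character
--
--     return code + ("X" * (3 - len(name)))
--
--   else:
--     code = ""
--
--     for character in name:
--       if character in CONSONANTS and len(code) < 3:
--         code += character
--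
--     for character in name:
--       if character in VOWELS and len(code) < 3:
--         code += character
--
--     return code
-- ===== SOURCE B (Python) =====
-- VOWELS = "AEIOU"
-- CONSONANTS = "BCDFGHJKLMNPQRSTVWXYZ"
--
-- def calculate_surname_chars(name: str):
--     letters = sorted((c for c in name if c in VOWELS + CONSONANTS),
--                      key=lambda c: c in VOWELS)
--     return "".join(letters[:3]) + "X" * (3 - len(name))
-- ===== Notes on version B (the rewrite author's own statement) =====
-- stated objective: alternative
-- what changed: Replaces A's four guarded accumulator passes under a length branch by a single filter of the name to alphabet letters followed by a stable sort keyed on vowelhood (consonants before vowels), then take-3 and repetition padding in one branch-free expression.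
import Mathlib
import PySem

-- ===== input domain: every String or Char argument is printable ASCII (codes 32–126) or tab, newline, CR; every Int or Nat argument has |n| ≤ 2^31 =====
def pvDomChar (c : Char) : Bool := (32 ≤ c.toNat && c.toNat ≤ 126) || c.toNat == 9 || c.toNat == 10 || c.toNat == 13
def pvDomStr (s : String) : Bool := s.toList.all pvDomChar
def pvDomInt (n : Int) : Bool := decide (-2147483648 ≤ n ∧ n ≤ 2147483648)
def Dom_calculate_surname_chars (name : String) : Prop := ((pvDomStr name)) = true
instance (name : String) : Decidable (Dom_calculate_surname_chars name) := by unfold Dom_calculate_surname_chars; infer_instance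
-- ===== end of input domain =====

-- B replaces A's four guarded accumulator passes under a length branch by one filter to
-- alphabet letters plus a stable sort keyed on vowelhood, then take-3 and padding
-- (objective: alternative); return values are identical.

def pvVOWELS : List Char := ['A', 'E', 'I', 'O', 'U']
def pvCONSONANTS : List Char :=
  ['B', 'C', 'D', 'F', 'G', 'H', 'J', 'K', 'L', 'M', 'N', 'P', 'Q', 'R', 'S', 'T', 'V', 'W', 'X', 'Y', 'Z']
-- VOWELS + CONSONANTS, the concatenation B filters against
def pvALPHA : List Char := pvVOWELS ++ pvCONSONANTS

-- ===== PORT A =====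
def calculate_surname_chars (name : String) : String :=
  let cs := name.toList
  if cs.length ≤ 3 then
    let code := cs.foldl (fun code c => if pvCONSONANTS.contains c then code ++ [c] else code) []
    let code := cs.foldl (fun code c => if pvVOWELS.contains c then code ++ [c] else code) code
    -- "X" * (3 - len(name)) : Python string repetition (empty for a non-positive count)
    String.ofList (code ++ List.replicate (3 - (cs.length : Int)).toNat 'X')
  else
    let code := cs.foldl
      (fun code c => if pvCONSONANTS.contains c ∧ code.length < 3 then code ++ [c] else code) []
    let code := cs.foldl
      (fun code c => if pvVOWELS.contains c ∧ code.length < 3 then code ++ [c] else code) code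
    String.ofList code

-- ===== PORT B =====
def calculate_surname_chars_alt (name : String) : String :=
  let cs := name.toList
  -- sorted(..., key=lambda c: c in VOWELS): Python's stable sort; the bool key orders as int 0/1
  let letters := PySem.List.sorted (cs.filter (fun c => pvALPHA.contains c))
      (fun c => if pvVOWELS.contains c then (1 : Int) else 0) false
  String.ofList (letters.take 3 ++ List.replicate (3 - (cs.length : Int)).toNat 'X')

-- ===== PRECONDITION & SPEC =====
def Spec_calculate_surname_chars (name : String) (out : String) : Prop := out = calculate_surname_chars_alt name
instance (name : String) (out : String) : Decidable (Spec_calculate_surname_chars name out) := by unfold Spec_calculate_surname_chars; infer_instance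

-- ===== CLAIM (what is proved, stated in full; the proofs are below) =====
def Claim_equal_calculate_surname_chars : Prop := ∀ (name : String), Dom_calculate_surname_chars name → Spec_calculate_surname_chars name (calculate_surname_chars name)

-- ===== LEMMAS AND PROOFS =====

-- no character is both a consonant and a vowel
lemma pv_not_both (c : Char) (h : pvCONSONANTS.contains c = true) : pvVOWELS.contains c = false := by
  simp [pvCONSONANTS] at h
  rcases h with rfl|rfl|rfl|rfl|rfl|rfl|rfl|rfl|rfl|rfl|rfl|rfl|rfl|rfl|rfl|rfl|rfl|rfl|rfl|rfl|rfl <;> decide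

lemma pv_filter_len_le (l : List Char) :
    (l.filter (fun c => pvCONSONANTS.contains c)).length
      + (l.filter (fun c => pvVOWELS.contains c)).length ≤ l.length := by
  induction l with
  | nil => simp
  | cons c l ih =>
    by_cases h1 : pvCONSONANTS.contains c = true
    · have h2 := pv_not_both c h1
      rw [List.filter_cons, List.filter_cons, h1, h2]
      simp only [if_true, if_false, List.length_cons, Bool.false_eq_true, List.length]
      omega
    · rw [List.filter_cons, List.filter_cons, Bool.eq_false_iff.mpr h1]
      by_cases h2 : pvVOWELS.contains c = true
      · rw [h2]; simp only [if_true, if_false, Bool.false_eq_true, List.length_cons]; omega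
      · rw [Bool.eq_false_iff.mpr h2]; simp only [Bool.false_eq_true, if_false, List.length_cons]; omega

lemma pv_foldl_bounded (p : Char → Bool) (l : List Char) (acc : List Char) :
    l.foldl (fun code c => if p c = true ∧ code.length < 3 then code ++ [c] else code) acc
      = acc ++ (l.filter p).take (3 - acc.length) := by
  induction l generalizing acc with
  | nil => simp
  | cons c l ih =>
    by_cases hp : p c = true
    · by_cases hl : acc.length < 3
      · have h3 : 3 - acc.length = (3 - (acc ++ [c]).length) + 1 := by
          simp [List.length_append]; omega
        rw [List.foldl_cons, if_pos (show p c = true ∧ acc.length < 3 from ⟨hp, hl⟩), ih,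
          List.filter_cons_of_pos hp, h3, List.take_succ_cons]
        simp
      · have h0 : 3 - acc.length = 0 := by omega
        simp [List.foldl_cons, hl, ih, h0]
    · simp [List.foldl_cons, hp, ih, List.filter_cons_of_neg]

-- insertBy walks past a prefix it is never inserted before
lemma pv_insertBy_skip (bef : Char → Char → Bool) (x : Char) (A B : List Char)
    (h : ∀ y ∈ A, bef x y = false) :
    PySem.List.insertBy bef x (A ++ B) = A ++ PySem.List.insertBy bef x B := by
  induction A with
  | nil => simp
  | cons a A ih =>
    have ha : bef x a = false := h a (List.mem_cons_self ..)
    simp only [List.cons_append, PySem.List.insertBy, ha, Bool.false_eq_true, if_false]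
    rw [ih (fun y hy => h y (List.mem_cons_of_mem _ hy))]

-- a stable sort by the 0/1 key `p` is exactly the (¬p, p) partition in original order
lemma pv_sorted_partition (p : Char → Bool) (xs : List Char) :
    PySem.List.sorted xs (fun c => if p c then (1 : Int) else 0) false
      = xs.filter (fun c => !p c) ++ xs.filter p := by
  rw [PySem.List.sorted_eq_foldl_insertBy]
  set key : Char → Int := fun c => if p c then (1 : Int) else 0 with hkey
  set bef : Char → Char → Bool := fun a b => decide (key a < key b) with hbef
  induction xs using List.reverseRecOn with
  | nil => simp
  | append_singleton ys x ih =>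
    rw [List.foldl_append, List.foldl_cons, List.foldl_nil, ih]
    by_cases hx : p x = true
    · -- vowel: never inserted before anything (key 1 < key y is false), lands at the end
      have hall : ∀ y ∈ ys.filter (fun c => !p c) ++ ys.filter p, bef x y = false := by
        intro y _
        simp only [hbef, hkey, hx, if_true, decide_eq_false_iff_not, not_lt]
        split <;> omega
      have := pv_insertBy_skip bef x (ys.filter (fun c => !p c) ++ ys.filter p) [] hall
      rw [List.append_nil] at this
      rw [this]
      simp [PySem.List.insertBy, List.filter_append, hx]
    · -- consonant: passes the ¬p block (0 < 0 false), inserted before the first p element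
      have hF : ∀ y ∈ ys.filter (fun c => !p c), bef x y = false := by
        intro y hy
        have hpy : p y = false := by
          have := List.of_mem_filter hy; simpa using this
        simp [hbef, hkey, hx, hpy]
      rw [pv_insertBy_skip bef x _ _ hF]
      have hT : PySem.List.insertBy bef x (ys.filter p) = x :: ys.filter p := by
        cases hT : ys.filter p with
        | nil => simp [PySem.List.insertBy]
        | cons t T =>
          have hpt : p t = true := List.of_mem_filter (hT ▸ List.mem_cons_self ..)
          simp [PySem.List.insertBy, hbef, hkey, hx, hpt]
      rw [hT]
      simp [List.filter_append, hx]

-- the alphabet membership test decomposes into vowel-or-consonant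
lemma pv_alpha_split (c : Char) :
    pvALPHA.contains c = (pvVOWELS.contains c || pvCONSONANTS.contains c) := by
  simp [pvALPHA]

-- B's sorted letter list is A's consonants-then-vowels list
lemma pv_letters_eq (cs : List Char) :
    PySem.List.sorted (cs.filter (fun c => pvALPHA.contains c))
        (fun c => if pvVOWELS.contains c then (1 : Int) else 0) false
      = cs.filter (fun c => pvCONSONANTS.contains c) ++ cs.filter (fun c => pvVOWELS.contains c) := by
  rw [pv_sorted_partition]
  congr 1
  · rw [List.filter_filter]
    apply List.filter_congr
    intro c _
    rw [pv_alpha_split]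
    by_cases hk : c ∈ pvCONSONANTS
    · have hv : c ∉ pvVOWELS := by
        have := pv_not_both c (by simpa using hk); simpa using this
      simp [hk, hv]
    · by_cases hv : c ∈ pvVOWELS <;> simp [hk, hv]
  · rw [List.filter_filter]
    apply List.filter_congr
    intro c _
    rw [pv_alpha_split]
    by_cases hv : c ∈ pvVOWELS <;> simp [hv]

-- ===== VERDICT (by name: the statement is the Claim_ definition above) =====
theorem calculate_surname_chars_spec : Claim_equal_calculate_surname_chars := by
  intro name _
  unfold Spec_calculate_surname_chars calculate_surname_chars calculate_surname_chars_alt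
  set cs := name.toList with hcs
  simp only []
  rw [pv_letters_eq]
  by_cases hlen : cs.length ≤ 3
  · rw [if_pos hlen]
    have hA := PySem.List.foldl_append_if (fun c => pvCONSONANTS.contains c) id cs ([] : List Char)
    have hB := PySem.List.foldl_append_if (fun c => pvVOWELS.contains c) id cs
      (cs.filter (fun c => pvCONSONANTS.contains c))
    simp only [List.map_id, List.nil_append, id] at hA hB
    rw [hA, hB]
    have htot : (cs.filter (fun c => pvCONSONANTS.contains c)
        ++ cs.filter (fun c => pvVOWELS.contains c)).length ≤ 3 := by
      rw [List.length_append]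
      exact le_trans (pv_filter_len_le cs) hlen
    rw [List.take_of_length_le htot]
  · rw [if_neg hlen]
    rw [pv_foldl_bounded, pv_foldl_bounded]
    have hpad : (3 - (cs.length : Int)).toNat = 0 := by omega
    rw [hpad]
    have htk : ((cs.filter (fun c => pvCONSONANTS.contains c))
        ++ cs.filter (fun c => pvVOWELS.contains c)).take 3
        = (cs.filter (fun c => pvCONSONANTS.contains c)).take 3
          ++ (cs.filter (fun c => pvVOWELS.contains c)).take
              (3 - (cs.filter (fun c => pvCONSONANTS.contains c)).length) := List.take_append
    rw [htk]
    simp only [List.nil_append, List.length_take, List.replicate_zero, List.append_nil]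
    congr 2
    congr 1
    have heta : List.filter pvCONSONANTS.contains cs
        = List.filter (fun c => pvCONSONANTS.contains c) cs := rfl
    rw [heta]
    simp only [List.length_nil]
    omega
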